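-- pv_equiv track=rewrite | github.com/AllenTay/6.0001 | ps5/ps5.py | feeder
-- ===== SOURCE A (Python) =====
-- import string
--
-- def feeder(word):
--     passer = str(word)
--     part_one = ''
--     for i in passer.lower():
--         if i in string.punctuation:
--             i = ' '
--             part_one += i
--         else:
--             part_one += i
--
--     part_two = ''
--     for j in part_one.split():
--         part_two += j + " "
--
--     return part_two
-- ===== SOURCE B (Python) =====
-- import string
--
-- def feeder(word):
--     result = ''
--     token = ''
--     for c in str(word).lower():
--         if c in string.punctuation or c.isspace():
--             if token:
--                 result += token + ' '
--                 token = ''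
--         else:
--             token += c
--     if token:
--         result += token + ' '
--     return result
-- ===== Notes on version B (the rewrite author's own statement) =====
-- stated objective: alternative
-- what changed: Replaced A's two passes (a punctuation-to-space map building an intermediate string, then split and a second rejoin loop) by a single-pass tokenizer that keeps a current token and flushes it with a trailing space at each separator run; same O(n) cost, no intermediate string.
import Mathlib
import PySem

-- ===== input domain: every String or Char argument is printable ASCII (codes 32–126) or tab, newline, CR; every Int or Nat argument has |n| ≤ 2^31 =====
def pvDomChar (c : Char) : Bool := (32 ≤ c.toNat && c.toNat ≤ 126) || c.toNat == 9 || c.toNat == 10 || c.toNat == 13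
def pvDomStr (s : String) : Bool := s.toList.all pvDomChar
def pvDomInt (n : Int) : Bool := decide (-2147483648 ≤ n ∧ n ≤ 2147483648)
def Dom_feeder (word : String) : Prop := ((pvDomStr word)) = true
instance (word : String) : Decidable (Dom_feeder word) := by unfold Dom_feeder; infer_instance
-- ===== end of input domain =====

-- B fuses A's two passes (punctuation→space map, then split/rejoin) into one tokenizer pass; same return value.

-- ===== PORT A =====
-- string.punctuation
def pyPunctuation : List Char := "!\"#$%&'()*+,-./:;<=>?@[\\]^_`{|}~".toList

-- 'for i in passer.lower(): if i in string.punctuation: part_one += " " else: part_one += i'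
def feederLoop1 : List Char → List Char → List Char
  | [], acc => acc
  | i :: rest, acc =>
      if pyPunctuation.contains i then feederLoop1 rest (acc ++ [' '])
      else feederLoop1 rest (acc ++ [i])

-- 'for j in part_one.split(): part_two += j + " "'
def feederLoop2 : List (List Char) → List Char → List Char
  | [], acc => acc
  | j :: rest, acc => feederLoop2 rest (acc ++ j ++ [' '])

def feeder (word : String) : String :=
  let passer := word
  let partOne := feederLoop1 (PySem.Chars.lower passer.toList) []
  String.ofList (feederLoop2 (PySem.Chars.split₀ partOne) [])

-- ===== PORT B =====
-- single pass over str(word).lower(): state = (result, current token)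
def feederAltGo : List Char → List Char → List Char → List Char
  | [], res, tok => if tok.isEmpty then res else res ++ tok ++ [' ']
  | c :: rest, res, tok =>
      if pyPunctuation.contains c || PySem.Chars.isspace c then
        if tok.isEmpty then feederAltGo rest res []
        else feederAltGo rest (res ++ tok ++ [' ']) []
      else feederAltGo rest res (tok ++ [c])

def feeder_alt (word : String) : String :=
  String.ofList (feederAltGo (PySem.Chars.lower word.toList) [] [])

-- ===== PRECONDITION & SPEC =====
def Spec_feeder (word : String) (out : String) : Prop := out = feeder_alt word
instance (word : String) (out : String) : Decidable (Spec_feeder word out) := by unfold Spec_feeder; infer_instance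

-- ===== CLAIM (what is proved, stated in full; the proofs are below) =====
def Claim_equal_feeder : Prop := ∀ (word : String), Dom_feeder word → Spec_feeder word (feeder word)

-- ===== LEMMAS AND PROOFS =====

-- A's first loop is the map sending punctuation to a space
def punctToSpace (c : Char) : Char := if pyPunctuation.contains c then ' ' else c

theorem feederLoop1_eq (cs acc : List Char) :
    feederLoop1 cs acc = acc ++ cs.map punctToSpace := by
  induction cs generalizing acc with
  | nil => simp [feederLoop1]
  | cons c rest ih =>
      simp only [feederLoop1, List.map, punctToSpace]
      split_ifs with h <;> simp [ih]

-- A's second loop appends a space to every word and concatenates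
theorem feederLoop2_eq (ws : List (List Char)) (acc : List Char) :
    feederLoop2 ws acc = acc ++ (ws.map (· ++ [' '])).flatten := by
  induction ws generalizing acc with
  | nil => simp [feederLoop2]
  | cons w rest ih => simp [feederLoop2, ih]

-- split₀.go's third argument is a pure accumulator
theorem split₀_go_acc (s : List Char) (cur : List Char) (acc : List (List Char)) :
    PySem.Chars.split₀.go s cur acc = acc.reverse ++ PySem.Chars.split₀.go s cur [] := by
  induction s generalizing cur acc with
  | nil =>
      simp only [PySem.Chars.split₀.go]
      split_ifs <;> simp
  | cons c rest ih =>
      simp only [PySem.Chars.split₀.go]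
      split_ifs with h1 h2
      · exact ih _ _
      · rw [ih _ (cur.reverse :: acc), ih _ [cur.reverse]]
        simp
      · exact ih _ _

-- punctToSpace turns the separator test into isspace
theorem isspace_punctToSpace (c : Char) :
    PySem.Chars.isspace (punctToSpace c) = (pyPunctuation.contains c || PySem.Chars.isspace c) := by
  unfold punctToSpace
  by_cases h : pyPunctuation.contains c = true
  · rw [if_pos h, h, Bool.true_or]; decide
  · rw [if_neg h, Bool.eq_false_iff.mpr h, Bool.false_or]

-- the tokenizer invariant: B's loop computes A's split/rejoin of the mapped string
theorem feederAltGo_eq (cs res tok : List Char) :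
    feederAltGo cs res tok =
      res ++ ((PySem.Chars.split₀.go (cs.map punctToSpace) tok.reverse []).map (· ++ [' '])).flatten := by
  induction cs generalizing res tok with
  | nil =>
      simp only [feederAltGo, List.map, PySem.Chars.split₀.go, List.isEmpty_reverse]
      by_cases h : tok.isEmpty
      · simp [h]
      · simp [h]
  | cons c rest ih =>
      simp only [feederAltGo, List.map, PySem.Chars.split₀.go, isspace_punctToSpace,
        List.isEmpty_reverse]
      by_cases hsep : (pyPunctuation.contains c || PySem.Chars.isspace c) = true
      · simp only [hsep, if_pos]
        by_cases htok : tok.isEmpty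
        · have : tok = [] := List.isEmpty_iff.mp htok
          subst this
          simpa using ih res []
        · simp only [htok, if_neg, Bool.false_eq_true, not_false_iff]
          rw [ih (res ++ tok ++ [' ']) [], split₀_go_acc _ _ [tok.reverse.reverse]]
          simp
      · have hc : pyPunctuation.contains c = false := by
          revert hsep; cases pyPunctuation.contains c <;> simp
        have hns : punctToSpace c = c := by
          unfold punctToSpace; rw [hc]; rfl
        simp only [Bool.not_eq_true] at hsep
        simp only [hsep, if_neg, Bool.false_eq_true, not_false_iff]
        rw [ih res (tok ++ [c])]
        simp [hns]

theorem feeder_eq_alt (word : String) : feeder word = feeder_alt word := by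
  show String.ofList (feederLoop2 (PySem.Chars.split₀ (feederLoop1 (PySem.Chars.lower word.toList) [])) []) =
      String.ofList (feederAltGo (PySem.Chars.lower word.toList) [] [])
  unfold PySem.Chars.split₀
  rw [feederLoop1_eq, feederLoop2_eq, feederAltGo_eq]
  simp

-- ===== VERDICT (by name: the statement is the Claim_ definition above) =====
theorem feeder_spec : Claim_equal_feeder := by
  intro word _
  unfold Spec_feeder
  exact feeder_eq_alt word
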